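-- pv_equiv track=rewrite | github.com/EsiAmartey/Cyber | CaesarEncrypt.py | caesar_encrypt_advanced
-- ===== SOURCE A (Python) =====
-- def validate_shift_value(shift):
--     if not isinstance(shift, int):
--         raise ValueError("Shift value must be an integer.")
--     if shift < 1 or shift > 25:
--         raise ValueError("Shift value must be between 1 and 25.")
--
-- def caesar_encrypt_advanced(plaintext, shift, salt):
--     validate_shift_value(shift)
--     ciphertext = ""
--     for char in plaintext:
--         if char.isalpha():
--             if char.islower():
--                 encrypted_char = chr((ord(char) - ord('a') + shift + salt) % 26 + ord('a'))
--             else: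
--                 encrypted_char = chr((ord(char) - ord('A') + shift + salt) % 26 + ord('A'))
--             ciphertext += encrypted_char
--         else:
--             ciphertext += char
--     return ciphertext
-- ===== SOURCE B (Python) =====
-- def validate_shift_value(shift):
--     if not isinstance(shift, int):
--         raise ValueError("Shift value must be an integer.")
--     if shift < 1 or shift > 25:
--         raise ValueError("Shift value must be between 1 and 25.")
--
-- def caesar_encrypt_advanced(plaintext, shift, salt):
--     validate_shift_value(shift)
--     eff = (shift + salt) % 26
--     lo = "abcdefghijklmnopqrstuvwxyz"
--     up = lo.upper()
--     table = str.maketrans(lo + up, lo[eff:] + lo[:eff] + up[eff:] + up[:eff])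
--     return plaintext.translate(table)
-- ===== Notes on version B (the rewrite author's own statement) =====
-- stated objective: idiomatic
-- what changed: Replaces the per-character isalpha/islower branching and string concatenation with one translation table (str.maketrans over two rotated alphabets) and a single plaintext.translate call.
import Mathlib
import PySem

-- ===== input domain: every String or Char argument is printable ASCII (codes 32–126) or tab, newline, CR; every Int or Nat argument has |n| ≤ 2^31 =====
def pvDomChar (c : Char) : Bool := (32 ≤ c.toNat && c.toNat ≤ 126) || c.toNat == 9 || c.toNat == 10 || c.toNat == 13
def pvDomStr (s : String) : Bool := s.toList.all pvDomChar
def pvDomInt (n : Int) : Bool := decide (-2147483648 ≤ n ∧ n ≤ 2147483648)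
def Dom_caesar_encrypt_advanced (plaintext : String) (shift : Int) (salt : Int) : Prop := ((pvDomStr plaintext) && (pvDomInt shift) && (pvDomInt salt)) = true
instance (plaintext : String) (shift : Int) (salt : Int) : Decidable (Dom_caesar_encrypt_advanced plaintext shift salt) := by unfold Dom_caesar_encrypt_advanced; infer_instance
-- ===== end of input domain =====

-- B replaces A's per-character isalpha/islower branching by one maketrans-style
-- translation table built from two rotated alphabets and a single translate pass (idiomatic).

-- ===== PORT A =====
def pvEncChar (shift salt : Int) (c : Char) : Char :=
  if PySem.Chars.isalpha c then
    if PySem.Chars.islower c then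
      Char.ofNat ((PySem.Int.mod ((c.toNat : Int) - 97 + shift + salt) 26).toNat + 97)
    else
      Char.ofNat ((PySem.Int.mod ((c.toNat : Int) - 65 + shift + salt) 26).toNat + 65)
  else c

def caesar_encrypt_advanced (plaintext : String) (shift : Int) (salt : Int) : String :=
  String.mk (plaintext.toList.foldl (fun acc c => acc ++ [pvEncChar shift salt c]) [])

-- ===== PORT B =====
def pvLowerAlpha : List Char := "abcdefghijklmnopqrstuvwxyz".toList
def pvUpperAlpha : List Char := PySem.Chars.upper pvLowerAlpha

def caesar_encrypt_advanced_alt (plaintext : String) (shift : Int) (salt : Int) : String :=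
  let eff : Int := PySem.Int.mod (shift + salt) 26
  let keys := pvLowerAlpha ++ pvUpperAlpha
  let vals := (PySem.List.slice pvLowerAlpha (some eff) none ++ PySem.List.slice pvLowerAlpha none (some eff))
           ++ (PySem.List.slice pvUpperAlpha (some eff) none ++ PySem.List.slice pvUpperAlpha none (some eff))
  let table := PySem.Dict.ofList (keys.zip vals)
  String.mk (plaintext.toList.map (fun c => table.getD c c))

-- ===== PRECONDITION & SPEC =====
-- A (via validate_shift_value) raises ValueError unless 1 <= shift <= 25; Pre_ admits exactly the shifts A accepts.
def Pre_caesar_encrypt_advanced (plaintext : String) (shift : Int) (salt : Int) : Prop :=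
  1 ≤ shift ∧ shift ≤ 25
instance (plaintext : String) (shift : Int) (salt : Int) : Decidable (Pre_caesar_encrypt_advanced plaintext shift salt) := by unfold Pre_caesar_encrypt_advanced; infer_instance

def pvWitness_caesar_encrypt_advanced : String × Int × Int := ("Hello, World!", 3, 40)

def Spec_caesar_encrypt_advanced (plaintext : String) (shift : Int) (salt : Int) (out : String) : Prop := out = caesar_encrypt_advanced_alt plaintext shift salt
instance (plaintext : String) (shift : Int) (salt : Int) (out : String) : Decidable (Spec_caesar_encrypt_advanced plaintext shift salt out) := by unfold Spec_caesar_encrypt_advanced; infer_instance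

-- ===== CLAIM (what is proved, stated in full; the proofs are below) =====
def Claim_equal_caesar_encrypt_advanced : Prop := ∀ (plaintext : String) (shift : Int) (salt : Int), Dom_caesar_encrypt_advanced plaintext shift salt → Pre_caesar_encrypt_advanced plaintext shift salt → Spec_caesar_encrypt_advanced plaintext shift salt (caesar_encrypt_advanced plaintext shift salt)

-- ===== LEMMAS AND PROOFS =====
set_option maxRecDepth 8000

-- B's table with the (nonnegative) effective rotation as a Nat
def pvVals (e : Nat) : List Char :=
  (pvLowerAlpha.drop e ++ pvLowerAlpha.take e) ++ (pvUpperAlpha.drop e ++ pvUpperAlpha.take e)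

def pvTableN (e : Nat) : PySem.Dict Char Char :=
  PySem.Dict.ofList ((pvLowerAlpha ++ pvUpperAlpha).zip (pvVals e))

theorem pv_foldl_append (f : Char → Char) :
    ∀ (l : List Char) (acc : List Char),
      l.foldl (fun acc c => acc ++ [f c]) acc = acc ++ l.map f := by
  intro l
  induction l with
  | nil => simp
  | cons c l ih => intro acc; simp [List.foldl, ih]

theorem pv_low_len : pvLowerAlpha.length = 26 := by decide
theorem pv_up_len : pvUpperAlpha.length = 26 := by decide
theorem pv_keys_nodup : (pvLowerAlpha ++ pvUpperAlpha).Nodup := by decide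
theorem pv_keys_alpha_all : (pvLowerAlpha ++ pvUpperAlpha).all PySem.Chars.isalpha = true := by rfl

theorem pv_keys_alpha : ∀ c ∈ pvLowerAlpha ++ pvUpperAlpha, PySem.Chars.isalpha c = true :=
  fun c hc => List.all_eq_true.mp pv_keys_alpha_all c hc
theorem pv_low_get : ∀ m < 26, pvLowerAlpha[m]? = some (Char.ofNat (97 + m)) := by decide
theorem pv_up_get : ∀ m < 26, pvUpperAlpha[m]? = some (Char.ofNat (65 + m)) := by decide

theorem pv_vals_len (e : Nat) : (pvVals e).length = 52 := by
  simp [pvVals, pv_low_len, pv_up_len]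
  omega

theorem pv_table_items (e : Nat) :
    (pvTableN e).items = (pvLowerAlpha ++ pvUpperAlpha).zip (pvVals e) := by
  have hfold : pvTableN e =
      ((pvLowerAlpha ++ pvUpperAlpha).zip (pvVals e)).foldl
        (fun d p => d.insert p.1 p.2) PySem.Dict.empty := rfl
  have hle : (pvLowerAlpha ++ pvUpperAlpha).length ≤ (pvVals e).length := by
    simp [pv_low_len, pv_up_len, pv_vals_len]
  have hnodup : (((pvLowerAlpha ++ pvUpperAlpha).zip (pvVals e)).map Prod.fst).Nodup := by
    rw [List.map_fst_zip hle]; exact pv_keys_nodup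
  rw [hfold, PySem.Dict.items_foldl_insert_fresh _ Prod.fst Prod.snd _
        (fun a _ => PySem.Dict.contains_empty _) hnodup]
  simp
  rfl

theorem pv_table_keys (e : Nat) : (pvTableN e).keys = pvLowerAlpha ++ pvUpperAlpha := by
  have hle : (pvLowerAlpha ++ pvUpperAlpha).length ≤ (pvVals e).length := by
    simp [pv_low_len, pv_up_len, pv_vals_len]
  simp only [PySem.Dict.keys, pv_table_items]
  exact List.map_fst_zip hle

theorem pv_low_getElem (m : Nat) (hm : m < 26) (h : m < pvLowerAlpha.length) :
    pvLowerAlpha[m] = Char.ofNat (97 + m) := by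
  have := pv_low_get m hm
  rwa [List.getElem?_eq_getElem h, Option.some_inj] at this

theorem pv_up_getElem (m : Nat) (hm : m < 26) (h : m < pvUpperAlpha.length) :
    pvUpperAlpha[m] = Char.ofNat (65 + m) := by
  have := pv_up_get m hm
  rwa [List.getElem?_eq_getElem h, Option.some_inj] at this

-- value half: the rotated lower/upper alphabet at index a is the alphabet at (a+e)%26
theorem pv_rot_getElem {α : Type} (l : List α) (hl : l.length = 26) (e : Nat) (he : e < 26)
    (a : Nat) (ha : a < 26) (h : a < (l.drop e ++ l.take e).length) :
    (l.drop e ++ l.take e)[a] = l[(a + e) % 26]'(by omega) := by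
  have hrot : l.drop e ++ l.take e = l.rotate e :=
    (List.rotate_eq_drop_append_take (by omega)).symm
  have h2 : a < (l.rotate e).length := hrot ▸ h
  rw [List.getElem_of_eq hrot, List.getElem_rotate l e a h2]
  simp only [hl]

theorem pv_vals_getElem_low (e : Nat) (he : e < 26) (a : Nat) (ha : a < 26)
    (h : a < (pvVals e).length) :
    (pvVals e)[a] = Char.ofNat (97 + (a + e) % 26) := by
  have hlen : a < (pvLowerAlpha.drop e ++ pvLowerAlpha.take e).length := by
    simp [pv_low_len]; omega
  simp only [pvVals] at h ⊢
  rw [List.getElem_append_left hlen,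
      pv_rot_getElem pvLowerAlpha pv_low_len e he a ha hlen,
      pv_low_getElem _ (by omega)]

theorem pv_vals_getElem_up (e : Nat) (he : e < 26) (a : Nat) (ha : a < 26)
    (h : 26 + a < (pvVals e).length) :
    (pvVals e)[26 + a] = Char.ofNat (65 + (a + e) % 26) := by
  have hlen1 : (pvLowerAlpha.drop e ++ pvLowerAlpha.take e).length = 26 := by
    simp [pv_low_len]; omega
  have hge : (pvLowerAlpha.drop e ++ pvLowerAlpha.take e).length ≤ 26 + a := by omega
  have h2 : 26 + a - (pvLowerAlpha.drop e ++ pvLowerAlpha.take e).length <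
      (pvUpperAlpha.drop e ++ pvUpperAlpha.take e).length := by
    simp [pv_low_len, pv_up_len]; omega
  simp only [pvVals] at h ⊢
  rw [List.getElem_append_right hge]
  have ha2 : 26 + a - (pvLowerAlpha.drop e ++ pvLowerAlpha.take e).length = a := by omega
  simp only [ha2] at h2 ⊢
  rw [pv_rot_getElem pvUpperAlpha pv_up_len e he a ha h2,
      pv_up_getElem _ (by omega)]

theorem pv_lookup_low (e : Nat) (he : e < 26) (a : Nat) (ha : a < 26) (d0 : Char) :
    (pvTableN e).getD (Char.ofNat (97 + a)) d0 = Char.ofNat (97 + (a + e) % 26) := by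
  have hzlen : a < ((pvLowerAlpha ++ pvUpperAlpha).zip (pvVals e)).length := by
    simp [pv_low_len, pv_up_len, pv_vals_len]; omega
  have hkey : a < (pvLowerAlpha ++ pvUpperAlpha).length := by
    simp [pv_low_len, pv_up_len]; omega
  have hkeyl : a < pvLowerAlpha.length := by rw [pv_low_len]; omega
  have hmem : (Char.ofNat (97 + a), Char.ofNat (97 + (a + e) % 26)) ∈ (pvTableN e).items := by
    rw [pv_table_items]
    have : ((pvLowerAlpha ++ pvUpperAlpha).zip (pvVals e))[a] =
        (Char.ofNat (97 + a), Char.ofNat (97 + (a + e) % 26)) := by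
      rw [List.getElem_zip, List.getElem_append_left hkeyl,
          pv_low_getElem a ha hkeyl, pv_vals_getElem_low e he a ha]
    rw [← this]; exact List.getElem_mem hzlen
  exact PySem.Dict.getD_of_mem_items _ hmem (by rw [pv_table_keys]; exact pv_keys_nodup) d0

theorem pv_lookup_up (e : Nat) (he : e < 26) (a : Nat) (ha : a < 26) (d0 : Char) :
    (pvTableN e).getD (Char.ofNat (65 + a)) d0 = Char.ofNat (65 + (a + e) % 26) := by
  have hzlen : 26 + a < ((pvLowerAlpha ++ pvUpperAlpha).zip (pvVals e)).length := by
    simp [pv_low_len, pv_up_len, pv_vals_len]; omega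
  have hge : pvLowerAlpha.length ≤ 26 + a := by rw [pv_low_len]; omega
  have hkeyu : 26 + a - pvLowerAlpha.length < pvUpperAlpha.length := by
    rw [pv_low_len, pv_up_len]; omega
  have hmem : (Char.ofNat (65 + a), Char.ofNat (65 + (a + e) % 26)) ∈ (pvTableN e).items := by
    rw [pv_table_items]
    have : ((pvLowerAlpha ++ pvUpperAlpha).zip (pvVals e))[26 + a] =
        (Char.ofNat (65 + a), Char.ofNat (65 + (a + e) % 26)) := by
      rw [List.getElem_zip, List.getElem_append_right hge]
      have ha2 : 26 + a - pvLowerAlpha.length = a := by rw [pv_low_len]; omega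
      simp only [ha2] at hkeyu ⊢
      rw [pv_up_getElem a ha hkeyu, pv_vals_getElem_up e he a ha]
    rw [← this]; exact List.getElem_mem hzlen
  exact PySem.Dict.getD_of_mem_items _ hmem (by rw [pv_table_keys]; exact pv_keys_nodup) d0

theorem pv_lookup_none (e : Nat) (c : Char) (h : PySem.Chars.isalpha c = false) :
    (pvTableN e).getD c c = c := by
  apply PySem.Dict.getD_of_get?_eq_none
  rw [PySem.Dict.get?_eq_none_iff_not_mem_keys, pv_table_keys]
  intro hmem
  have := pv_keys_alpha c hmem
  rw [h] at this
  exact Bool.false_ne_true this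

-- the per-character equality: A's branch arithmetic = B's table lookup
theorem pv_char (shift salt : Int) (c : Char) :
    pvEncChar shift salt c =
      (pvTableN (PySem.Int.mod (shift + salt) 26).toNat).getD c c := by
  have hm : PySem.Int.mod (shift + salt) 26 = (shift + salt) % 26 :=
    PySem.Int.mod_eq_emod_of_pos (by omega)
  have he : (PySem.Int.mod (shift + salt) 26).toNat < 26 := by rw [hm]; omega
  by_cases halpha : PySem.Chars.isalpha c
  · by_cases hlow : PySem.Chars.islower c
    · have hb : 97 ≤ c.toNat ∧ c.toNat ≤ 122 := by
        simp only [PySem.Chars.islower, Bool.and_eq_true, decide_eq_true_eq,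
          Char.le_def, UInt32.le_iff_toNat_le] at hlow
        exact ⟨hlow.1, hlow.2⟩
      have hc : c = Char.ofNat (97 + (c.toNat - 97)) := by
        have : 97 + (c.toNat - 97) = c.toNat := by omega
        rw [this, Char.ofNat_toNat]
      rw [pvEncChar, if_pos halpha, if_pos hlow]
      conv_rhs => rw [hc]
      rw [pv_lookup_low _ he _ (by omega)]
      congr 1
      rw [PySem.Int.mod_eq_emod_of_pos (by omega), hm]
      omega
    · have hup : PySem.Chars.isupper c = true := by
        simp only [PySem.Chars.isalpha, Bool.or_eq_true] at halpha
        rcases halpha with h | h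
        · exact h
        · exact absurd h hlow
      have hb : 65 ≤ c.toNat ∧ c.toNat ≤ 90 := by
        simp only [PySem.Chars.isupper, Bool.and_eq_true, decide_eq_true_eq,
          Char.le_def, UInt32.le_iff_toNat_le] at hup
        exact ⟨hup.1, hup.2⟩
      have hc : c = Char.ofNat (65 + (c.toNat - 65)) := by
        have : 65 + (c.toNat - 65) = c.toNat := by omega
        rw [this, Char.ofNat_toNat]
      rw [pvEncChar, if_pos halpha, if_neg (by simp [hlow])]
      conv_rhs => rw [hc]
      rw [pv_lookup_up _ he _ (by omega)]
      congr 1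
      rw [PySem.Int.mod_eq_emod_of_pos (by omega), hm]
      omega
  · rw [pvEncChar, if_neg halpha,
        pv_lookup_none _ c (Bool.not_eq_true _ ▸ halpha)]

-- B's slices reduce to drop/take: the alt port is a map of pvTableN lookups
theorem pv_alt_eq (plaintext : String) (shift salt : Int) :
    caesar_encrypt_advanced_alt plaintext shift salt =
      String.mk (plaintext.toList.map
        (fun c => (pvTableN (PySem.Int.mod (shift + salt) 26).toNat).getD c c)) := by
  have h0 : 0 ≤ PySem.Int.mod (shift + salt) 26 := by
    rw [PySem.Int.mod_eq_emod_of_pos (by omega)]; omega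
  simp only [caesar_encrypt_advanced_alt, pvTableN, pvVals,
    PySem.List.slice_from _ h0, PySem.List.slice_to _ h0]

-- ===== VERDICT (by name: the statement is the Claim_ definition above) =====
theorem caesar_encrypt_advanced_spec : Claim_equal_caesar_encrypt_advanced := by
  intro plaintext shift salt _ _
  show caesar_encrypt_advanced plaintext shift salt = _
  rw [caesar_encrypt_advanced, pv_foldl_append, List.nil_append, pv_alt_eq]
  congr 1
  exact List.map_congr_left (fun c _ => pv_char shift salt c)
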